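-- pv_equiv track=rewrite | github.com/jonatasoli/fast-ecommerce-back | app/settings/repository.py | obfuscate_settings_value
-- ===== SOURCE A (Python) =====
-- SENSITIVE_FIELDS = {
--     'PAYMENT': ['gateway_key', 'gateway_secret_key'],
--     'LOGISTICS': ['logistics_user', 'logistics_pass', 'logistics_api_secret'],
--     'NOTIFICATION': ['api_key', 'secret_key'],
--     'CDN': ['api_key', 'secret_key'],
--     'CRM': ['access_key'],
--     'MAIL': ['key', 'secret'],
--     'BUCKET': ['secret', 'key'],
-- }
--
-- def obfuscate_value(value: str, show_chars: int = 4) -> str: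
--     """Ofuscar valor sensível mostrando apenas alguns caracteres."""
--     if not value or len(value) <= show_chars:
--         return '*' * len(value) if value else ''
--     return value[:show_chars] + '*' * (len(value) - show_chars)
--
-- def obfuscate_settings_value(field_type: str, value_dict: dict) -> dict:
--     """Ofuscar campos sensíveis no valor do setting."""
--     if field_type not in SENSITIVE_FIELDS:
--         return value_dict
--
--     obfuscated = value_dict.copy()
--     sensitive_keys = SENSITIVE_FIELDS[field_type]
--
--     for key in sensitive_keys:
--         if obfuscated.get(key):
--             obfuscated[key] = obfuscate_value(str(obfuscated[key]))
--
--     return obfuscated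
-- ===== SOURCE B (Python) =====
-- SENSITIVE_FIELDS = {
--     'PAYMENT': ['gateway_key', 'gateway_secret_key'],
--     'LOGISTICS': ['logistics_user', 'logistics_pass', 'logistics_api_secret'],
--     'NOTIFICATION': ['api_key', 'secret_key'],
--     'CDN': ['api_key', 'secret_key'],
--     'CRM': ['access_key'],
--     'MAIL': ['key', 'secret'],
--     'BUCKET': ['secret', 'key'],
-- }
--
--
-- def _mask(value: str) -> str:
--     """Keep the first 4 chars only when more than 4 exist, star the rest."""
--     keep = 4 if len(value) > 4 else 0
--     return value[:keep] + '*' * (len(value) - keep)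
--
--
-- def obfuscate_settings_value(field_type: str, value_dict: dict) -> dict:
--     """Ofuscar campos sensíveis no valor do setting."""
--     sensitive = SENSITIVE_FIELDS.get(field_type)
--     if sensitive is None:
--         return value_dict
--     sensitive = set(sensitive)
--     return {
--         k: _mask(str(v)) if k in sensitive and v else v
--         for k, v in value_dict.items()
--     }
-- ===== Notes on version B (the rewrite author's own statement) =====
-- stated objective: idiomatic
-- what changed: Instead of copying the dict and patching it by looping over the fixed sensitive-key list with get/setitem, B looks the sensitive list up once, turns it into a set, and rebuilds the result in a single dict comprehension over value_dict.items(), masking an entry exactly when its key is sensitive and its value truthy; the mask helper is also rewritten as one slice+pad formula instead of an if/else chain.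
import Mathlib
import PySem

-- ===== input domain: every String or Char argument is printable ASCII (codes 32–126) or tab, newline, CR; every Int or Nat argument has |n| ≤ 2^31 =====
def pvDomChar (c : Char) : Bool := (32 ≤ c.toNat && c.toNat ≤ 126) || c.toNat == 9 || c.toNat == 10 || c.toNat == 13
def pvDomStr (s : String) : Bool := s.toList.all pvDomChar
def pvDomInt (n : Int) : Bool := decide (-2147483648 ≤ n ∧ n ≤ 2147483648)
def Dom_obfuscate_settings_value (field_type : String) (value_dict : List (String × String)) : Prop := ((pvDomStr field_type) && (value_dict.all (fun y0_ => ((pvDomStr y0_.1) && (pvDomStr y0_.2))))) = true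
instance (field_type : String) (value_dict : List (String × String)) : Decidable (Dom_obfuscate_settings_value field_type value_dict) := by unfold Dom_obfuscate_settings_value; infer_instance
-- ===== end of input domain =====

-- B rebuilds the result in one pass over value_dict with a sensitive-key set, instead of
-- patching a copy key-by-key as A does; equivalence is proved on assoc lists with unique keys.

def pvSENSITIVE_FIELDS : PySem.Dict String (List String) :=
  PySem.Dict.mk
    [("PAYMENT", ["gateway_key", "gateway_secret_key"]),
     ("LOGISTICS", ["logistics_user", "logistics_pass", "logistics_api_secret"]),
     ("NOTIFICATION", ["api_key", "secret_key"]),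
     ("CDN", ["api_key", "secret_key"]),
     ("CRM", ["access_key"]),
     ("MAIL", ["key", "secret"]),
     ("BUCKET", ["secret", "key"])]

-- ===== PORT A =====
-- obfuscate_value(value, 4), body on List Char (PySem.Chars level; exact: '+' on str is ++ , '*'*n is replicate)
def pvObfuscateValueChars (cs : List Char) : List Char :=
  if cs = [] ∨ PySem.Chars.len cs ≤ 4 then
    (if cs ≠ [] then List.replicate cs.length '*' else [])
  else
    PySem.Chars.slice cs none (some 4) ++ List.replicate (cs.length - 4) '*'

def pvObfuscateValue (value : String) : String :=
  String.mk (pvObfuscateValueChars value.toList)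

def obfuscate_settings_value (field_type : String) (value_dict : List (String × String)) : List (String × String) :=
  if pvSENSITIVE_FIELDS.contains field_type = false then value_dict
  else
    let sensitive_keys := (pvSENSITIVE_FIELDS.get? field_type).getD []
    (sensitive_keys.foldl
      (fun d key =>
        match d.get? key with
        | some v => if v ≠ "" then d.insert key (pvObfuscateValue v) else d
        | none => d)
      (PySem.Dict.mk value_dict)).items

-- ===== PORT B =====
-- _mask(value), body on List Char
def pvMaskChars (cs : List Char) : List Char :=
  let keep : Nat := if 4 < PySem.Chars.len cs then 4 else 0
  PySem.Chars.slice cs none (some (keep : Int)) ++ List.replicate (cs.length - keep) '*'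

def pvMask (value : String) : String :=
  String.mk (pvMaskChars value.toList)

def obfuscate_settings_value_alt (field_type : String) (value_dict : List (String × String)) : List (String × String) :=
  match pvSENSITIVE_FIELDS.get? field_type with
  | none => value_dict
  | some ks =>
      let sensitive := PySem.Set.ofList ks
      value_dict.map (fun p => if p.1 ∈ sensitive ∧ p.2 ≠ "" then (p.1, pvMask p.2) else p)

-- ===== PRECONDITION & SPEC =====
-- Pre_ admits exactly the assoc lists that represent a Python dict (unique keys);
-- a list with duplicate keys is not the image of any dict input of A.
def Pre_obfuscate_settings_value (field_type : String) (value_dict : List (String × String)) : Prop :=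
  (value_dict.map Prod.fst).Nodup

instance (field_type : String) (value_dict : List (String × String)) : Decidable (Pre_obfuscate_settings_value field_type value_dict) := by unfold Pre_obfuscate_settings_value; infer_instance

def pvWitness_obfuscate_settings_value : String × (List (String × String)) :=
  ("PAYMENT", [("gateway_key", "supersecret123"), ("endpoint", "https://x")])

def Spec_obfuscate_settings_value (field_type : String) (value_dict : List (String × String)) (out : List (String × String)) : Prop := out = obfuscate_settings_value_alt field_type value_dict
instance (field_type : String) (value_dict : List (String × String)) (out : List (String × String)) : Decidable (Spec_obfuscate_settings_value field_type value_dict out) := by unfold Spec_obfuscate_settings_value; infer_instance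

-- ===== CLAIM (what is proved, stated in full; the proofs are below) =====
def Claim_equal_obfuscate_settings_value : Prop := ∀ (field_type : String) (value_dict : List (String × String)), Dom_obfuscate_settings_value field_type value_dict → Pre_obfuscate_settings_value field_type value_dict → Spec_obfuscate_settings_value field_type value_dict (obfuscate_settings_value field_type value_dict)

-- ===== LEMMAS AND PROOFS =====

theorem pvMapId {α : Type} (l : List α) (f : α → α) (h : ∀ a ∈ l, f a = a) : l.map f = l :=
  (List.map_congr_left h).trans (List.map_id l)

-- the two mask helpers agree on every string
theorem pvMask_eq_chars (cs : List Char) : pvObfuscateValueChars cs = pvMaskChars cs := by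
  unfold pvObfuscateValueChars pvMaskChars
  by_cases h : 4 < PySem.Chars.len cs
  · have hne : ¬ (cs = [] ∨ PySem.Chars.len cs ≤ 4) := by
      push_neg; constructor
      · rintro rfl; simp [PySem.Chars.len] at h
      · omega
    simp only [if_neg hne, if_pos h]
    norm_cast
  · have hle : PySem.Chars.len cs ≤ 4 := by omega
    have hlen : PySem.Chars.len cs = cs.length := PySem.Chars.len_eq cs
    simp only [if_pos (Or.inr hle), if_neg h]
    have hsl : PySem.List.slice cs none (some (0 : Int)) = [] := by
      rw [PySem.List.slice_to cs (le_refl 0)]; simp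
    by_cases hcs : cs = []
    · subst hcs; simp [hsl]
    · simp [hcs, hsl]

theorem pvMask_eq (v : String) : pvObfuscateValue v = pvMask v :=
  congrArg String.mk (pvMask_eq_chars v.toList)

-- one iteration of A's loop, on a dict with unique keys, is a conditional map over items
theorem pvStep_items (d : PySem.Dict String String) (k : String) (hnd : d.keys.Nodup) :
    (match d.get? k with
      | some v => if v ≠ "" then d.insert k (pvObfuscateValue v) else d
      | none => d).items
    = d.items.map (fun p => if p.1 = k ∧ p.2 ≠ "" then (p.1, pvObfuscateValue p.2) else p) := by
  cases hget : d.get? k with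
  | none =>
      have hk : k ∉ d.keys := (PySem.Dict.get?_eq_none_iff_not_mem_keys d k).mp hget
      simp only
      refine (pvMapId d.items _ ?_).symm
      intro p hp
      have : p.1 ≠ k := by
        intro h; exact hk (h ▸ PySem.Dict.mem_keys_of_mem_items d hp)
      simp [this]
  | some v =>
      have hvp : ∀ p ∈ d.items, p.1 = k → p.2 = v := by
        intro p hp h1
        have : d.get? p.1 = some p.2 := by
          have := PySem.Dict.get?_of_mem_items (d := d) (k := p.1) (v := p.2) (by simpa using hp) hnd
          exact this
        rw [h1, hget] at this; exact (Option.some.injEq _ _ ▸ this).symm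
      by_cases hv : v = ""
      · subst hv
        simp only
        rw [if_neg (fun h => h rfl)]
        refine (pvMapId d.items _ ?_).symm
        intro p hp
        by_cases h1 : p.1 = k
        · have := hvp p hp h1; simp [this]
        · simp [h1]
      · have hcont : d.contains k = true := by
          rw [PySem.Dict.contains_eq_isSome_get?, hget]; rfl
        simp only [ne_eq, hv, not_false_eq_true, if_pos]
        rw [PySem.Dict.items_insert_of_contains (h := hcont)]
        refine List.map_congr_left ?_
        intro p hp
        by_cases h1 : p.1 = k
        · have h2 := hvp p hp h1
          simp [h1, h2, hv]
        · simp [h1]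

-- the loop step never changes the key sequence
theorem pvStep_keys (d : PySem.Dict String String) (k : String) (hnd : d.keys.Nodup) :
    (match d.get? k with
      | some v => if v ≠ "" then d.insert k (pvObfuscateValue v) else d
      | none => d).keys = d.keys := by
  show ((match d.get? k with
      | some v => if v ≠ "" then d.insert k (pvObfuscateValue v) else d
      | none => d).items).map Prod.fst = d.items.map Prod.fst
  rw [pvStep_items d k hnd, List.map_map]
  refine List.map_congr_left ?_
  intro p _
  by_cases h : p.1 = k ∧ p.2 ≠ "" <;> simp [h]

-- A's whole loop over a duplicate-free key list is a single conditional map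
theorem pvFold_items (ks : List String) (hks : ks.Nodup) (d : PySem.Dict String String)
    (hnd : d.keys.Nodup) :
    (ks.foldl
      (fun d key =>
        match d.get? key with
        | some v => if v ≠ "" then d.insert key (pvObfuscateValue v) else d
        | none => d) d).items
    = d.items.map (fun p => if p.1 ∈ ks ∧ p.2 ≠ "" then (p.1, pvObfuscateValue p.2) else p) := by
  induction ks generalizing d with
  | nil => simp
  | cons k ks ih =>
      have hk : k ∉ ks := (List.nodup_cons.mp hks).1
      have hks' : ks.Nodup := (List.nodup_cons.mp hks).2
      rw [List.foldl_cons]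
      rw [ih hks' _ (by rw [pvStep_keys d k hnd]; exact hnd)]
      rw [pvStep_items d k hnd, List.map_map]
      refine List.map_congr_left ?_
      intro p _
      simp only [Function.comp_apply, List.mem_cons]
      by_cases h1 : p.1 = k
      · by_cases h2 : p.2 = ""
        · simp [h1, h2]
        · have hnotin : p.1 ∉ ks := h1 ▸ hk
          simp [h1, h2, hk]
      · simp [h1]

-- ===== VERDICT (by name: the statement is the Claim_ definition above) =====
theorem obfuscate_settings_value_spec : Claim_equal_obfuscate_settings_value := by
  intro ft vd _ hpre
  unfold Spec_obfuscate_settings_value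
  unfold obfuscate_settings_value obfuscate_settings_value_alt
  have hkeys : (PySem.Dict.mk vd).keys = vd.map Prod.fst := rfl
  have hitems : (PySem.Dict.mk vd).items = vd := rfl
  have main : ∀ ks : List String, ks.Nodup →
      (ks.foldl
        (fun d key =>
          match d.get? key with
          | some v => if v ≠ "" then d.insert key (pvObfuscateValue v) else d
          | none => d) (PySem.Dict.mk vd)).items
      = vd.map (fun p => if p.1 ∈ PySem.Set.ofList ks ∧ p.2 ≠ "" then (p.1, pvMask p.2) else p) := by
    intro ks hks
    rw [pvFold_items ks hks _ (by rw [hkeys]; exact hpre), hitems]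
    refine List.map_congr_left ?_
    intro p _
    rw [pvMask_eq]
    by_cases h : p.1 ∈ ks ∧ p.2 ≠ ""
    · rw [if_pos h, if_pos ⟨(PySem.Set.mem_ofList _ _).mpr h.1, h.2⟩]
    · rw [if_neg h, if_neg (by rw [PySem.Set.mem_ofList]; exact h)]
  by_cases h1 : ft = "PAYMENT"
  · subst h1; rw [if_neg (by decide)]; exact main _ (by decide)
  · by_cases h2 : ft = "LOGISTICS"
    · subst h2; rw [if_neg (by decide)]; exact main _ (by decide)
    · by_cases h3 : ft = "NOTIFICATION"
      · subst h3; rw [if_neg (by decide)]; exact main _ (by decide)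
      · by_cases h4 : ft = "CDN"
        · subst h4; rw [if_neg (by decide)]; exact main _ (by decide)
        · by_cases h5 : ft = "CRM"
          · subst h5; rw [if_neg (by decide)]; exact main _ (by decide)
          · by_cases h6 : ft = "MAIL"
            · subst h6; rw [if_neg (by decide)]; exact main _ (by decide)
            · by_cases h7 : ft = "BUCKET"
              · subst h7; rw [if_neg (by decide)]; exact main _ (by decide)
              · have hget : pvSENSITIVE_FIELDS.get? ft = none := by
                  simp [pvSENSITIVE_FIELDS, PySem.Dict.get?_mk_cons, PySem.Dict.get?, beq_iff_eq,
                        Ne.symm h1, Ne.symm h2, Ne.symm h3, Ne.symm h4, Ne.symm h5, Ne.symm h6, Ne.symm h7]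
                have hcont : pvSENSITIVE_FIELDS.contains ft = false := by
                  rw [PySem.Dict.contains_eq_isSome_get?, hget]; rfl
                rw [if_pos hcont, hget]
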